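-- pv_equiv track=rewrite | github.com/ReneCoHo/adventofcode | 2025/6/trash.py | calcluate_digit_operations
-- ===== SOURCE A (Python) =====
-- def calcluate_digit_operations(lines, operations):
--     results = []
--
--     o = 0
--     c = 0
--     while c < len(lines[1]):
--         op = operations[o]
--         if op == "+":
--             r = 0
--         else:
--             r = 1
--         while c < len(lines[1]):
--             d = ""
--             for l in lines:
--                 if not l[c] ==" ":
--                     d += l[c]
--             c += 1
--             if d:
--                 f = int(d)
--                 if op == "+":
--                     r+=f
--                 else:
--                     r*=f
--             else:
--                 break
--         results.append(r)
--         o += 1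
--
--     return results
-- ===== SOURCE B (Python) =====
-- def calcluate_digit_operations(lines, operations):
--     width = len(lines[1])
--     # per-column strings of non-space characters
--     cols = ["".join(l[c] for l in lines if l[c] != " ") for c in range(width)]
--     # split into groups of ints; each blank column ends a group
--     groups = []
--     cur = []
--     for d in cols:
--         if d:
--             cur.append(int(d))
--         else:
--             groups.append(cur)
--             cur = []
--     if cols and cols[-1]:
--         groups.append(cur)
--     # evaluate each group with its operation
--     results = []
--     for g, nums in enumerate(groups):
--         if operations[g] == "+":
--             r = 0
--             for f in nums:
--                 r += f
--         else:
--             r = 1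
--             for f in nums:
--                 r *= f
--         results.append(r)
--     return results
-- ===== Notes on version B (the rewrite author's own statement) =====
-- stated objective: alternative
-- what changed: A's nested while loops sharing one column counter (with break) are replaced by three independent phases: build the list of per-column digit strings, split it into groups at blank columns with a single fold, then evaluate each group with its operation via enumerate.
import Mathlib
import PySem

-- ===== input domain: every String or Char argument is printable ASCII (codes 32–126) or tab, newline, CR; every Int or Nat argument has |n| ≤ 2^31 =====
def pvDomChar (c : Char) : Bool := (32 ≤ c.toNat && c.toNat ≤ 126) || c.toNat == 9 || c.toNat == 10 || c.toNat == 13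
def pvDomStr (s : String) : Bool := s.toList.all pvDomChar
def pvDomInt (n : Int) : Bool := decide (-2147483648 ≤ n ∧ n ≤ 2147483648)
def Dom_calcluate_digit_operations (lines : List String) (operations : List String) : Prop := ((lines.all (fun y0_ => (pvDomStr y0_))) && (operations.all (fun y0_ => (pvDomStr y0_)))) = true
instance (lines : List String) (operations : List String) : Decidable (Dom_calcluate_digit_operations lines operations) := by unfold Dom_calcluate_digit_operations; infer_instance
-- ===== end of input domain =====

-- B replaces A's nested while loops with a shared column counter by three plain phases
-- (build per-column strings, split them into groups at blank columns, fold each group); alternative decomposition, same cost.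

-- shared helpers (both programs read len(lines[1]) and build the same per-column string)
def pvWidth (lines : List String) : Nat :=
  ((PySem.List.pyGet? lines 1).getD "").toList.length

-- the non-space characters of column c, top to bottom ('for l in lines: if not l[c] == " ": d += l[c]';
-- out-of-range l[c] is an IndexError in Python, excluded by Pre_; the port skips it)
def pvCol (lines : List String) (c : Nat) : List Char :=
  lines.foldl (fun d l => let ch := l.toList.getD c ' '; if ch ≠ ' ' then d ++ [ch] else d) []

-- ===== PORT A =====
-- inner while: consume columns from c on, updating r, until a blank column (break) or c = width;
-- returns (r, final c).  The while loop is transcribed as structural recursion on the fuel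
-- width - c (c strictly increases each iteration).  int(d) failing is a ValueError in Python,
-- excluded by Pre_ (port uses getD 0).
def pvInnerAGo (lines : List String) (width : Nat) (op : String) :
    Nat → Nat → Int → Int × Nat
  | 0, c, r => (r, c)
  | fuel + 1, c, r =>
    if c < width then
      let d := pvCol lines c
      if d.isEmpty then (r, c + 1)
      else
        pvInnerAGo lines width op fuel (c + 1)
          (if op == "+" then r + (PySem.Int.ofChars? d).getD 0 else r * (PySem.Int.ofChars? d).getD 0)
    else (r, c)

def pvInnerA (lines : List String) (width : Nat) (op : String) (c : Nat) (r : Int) : Int × Nat :=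
  pvInnerAGo lines width op (width - c) c r

-- outer while: one group per iteration ('op = operations[o]'; operations[o] missing is an
-- IndexError in Python, excluded by Pre_; the port uses getD "*").  Fuel = width - c again.
def pvOuterAGo (lines : List String) (operations : List String) (width : Nat) :
    Nat → Nat → Nat → List Int → List Int
  | 0, _, _, results => results
  | fuel + 1, o, c, results =>
    if c < width then
      let op := (PySem.List.pyGet? operations (o : Int)).getD "*"
      let p := pvInnerA lines width op c (if op == "+" then 0 else 1)
      pvOuterAGo lines operations width fuel (o + 1) p.2 (results ++ [p.1])
    else results

def calcluate_digit_operations (lines : List String) (operations : List String) : List Int :=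
  pvOuterAGo lines operations (pvWidth lines) (pvWidth lines) 0 0 []

-- ===== PORT B =====
def calcluate_digit_operations_alt (lines : List String) (operations : List String) : List Int :=
  let width := pvWidth lines
  let cols := (List.range width).map (fun c => pvCol lines c)
  let st := cols.foldl
    (fun (st : List (List Int) × List Int) d =>
      if d.isEmpty then (st.1 ++ [st.2], [])
      else (st.1, st.2 ++ [(PySem.Int.ofChars? d).getD 0])) ([], [])
  let groups :=
    if (cols.getLast?.elim false (fun d => !d.isEmpty)) then st.1 ++ [st.2] else st.1
  (PySem.List.enumerate groups 0).map (fun p =>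
    if (PySem.List.pyGet? operations p.1).getD "*" == "+" then p.2.foldl (· + ·) 0
    else p.2.foldl (· * ·) 1)

-- ===== PRECONDITION & SPEC =====
-- Pre_ is exactly the set of inputs on which the Python A returns (it excludes only exceptions):
-- lines[1] must exist (IndexError), every line must reach every column c < len(lines[1])
-- (IndexError), every non-blank column string must be a valid int literal (ValueError), and
-- operations must have one entry per group (IndexError), where the number of groups is the number
-- of blank columns plus one more if the last column is non-blank.
def Pre_calcluate_digit_operations (lines : List String) (operations : List String) : Prop :=
  2 ≤ lines.length ∧
  (∀ l ∈ lines, pvWidth lines ≤ l.toList.length) ∧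
  (∀ c ∈ List.range (pvWidth lines),
      (pvCol lines c).isEmpty = true ∨ (PySem.Int.ofChars? (pvCol lines c)).isSome = true) ∧
  (let cols := (List.range (pvWidth lines)).map (pvCol lines)
   cols.countP (·.isEmpty) +
     (match cols.getLast? with | some d => if d.isEmpty then 0 else 1 | none => 0)
     ≤ operations.length)

instance (lines : List String) (operations : List String) :
    Decidable (Pre_calcluate_digit_operations lines operations) := by
  unfold Pre_calcluate_digit_operations; infer_instance

def pvWitness_calcluate_digit_operations : List String × List String :=
  (["1 2", "3 4"], ["+", "*"])

def Spec_calcluate_digit_operations (lines : List String) (operations : List String) (out : List Int) : Prop := out = calcluate_digit_operations_alt lines operations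
instance (lines : List String) (operations : List String) (out : List Int) : Decidable (Spec_calcluate_digit_operations lines operations out) := by unfold Spec_calcluate_digit_operations; infer_instance

-- ===== CLAIM (what is proved, stated in full; the proofs are below) =====
def Claim_equal_calcluate_digit_operations : Prop := ∀ (lines : List String) (operations : List String), Dom_calcluate_digit_operations lines operations → Pre_calcluate_digit_operations lines operations → Spec_calcluate_digit_operations lines operations (calcluate_digit_operations lines operations)

-- ===== LEMMAS AND PROOFS =====

-- the inner loop never moves c backwards (needed for the outer loop's fuel accounting)
theorem pvInnerAGo_le (lines : List String) (width : Nat) (op : String) :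
    ∀ fuel c r, c ≤ (pvInnerAGo lines width op fuel c r).2 := by
  intro fuel
  induction fuel with
  | zero => intro c r; exact le_rfl
  | succ fuel ih =>
    intro c r
    rw [pvInnerAGo]
    by_cases hc : c < width
    · rw [if_pos hc]
      by_cases hd : (pvCol lines c).isEmpty
      · rw [if_pos hd]
        exact Nat.le_succ c
      · rw [if_neg hd]
        exact le_trans (Nat.le_succ c) (ih (c + 1) _)
    · rw [if_neg hc]

theorem pvInnerAGo_lt (lines : List String) (width : Nat) (op : String) :
    ∀ fuel c r, c < width → width - c ≤ fuel → c < (pvInnerAGo lines width op fuel c r).2 := by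
  intro fuel
  induction fuel with
  | zero => intro c r hc h; omega
  | succ fuel ih =>
    intro c r hc h
    rw [pvInnerAGo, if_pos hc]
    by_cases hd : (pvCol lines c).isEmpty
    · rw [if_pos hd]
      exact Nat.lt_succ_self c
    · rw [if_neg hd]
      exact lt_of_lt_of_le (Nat.lt_succ_self c) (pvInnerAGo_le lines width op fuel (c + 1) _)


-- list-level reformulation of A's inner loop (consume columns until the first blank one)
def pvInnerL (op : String) : List (List Char) → Int → Int × List (List Char)
  | [], r => (r, [])
  | d :: rest, r =>
    if d.isEmpty then (r, rest)
    else pvInnerL op rest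
      (if op == "+" then r + (PySem.Int.ofChars? d).getD 0 else r * (PySem.Int.ofChars? d).getD 0)

theorem pvInnerL_len (op : String) : ∀ cols r, ((pvInnerL op cols r).2).length ≤ cols.length := by
  intro cols
  induction cols with
  | nil => intro r; simp [pvInnerL]
  | cons d rest ih =>
    intro r
    simp only [pvInnerL]
    by_cases hd : d.isEmpty
    · rw [if_pos hd]
      simp
    · rw [if_neg hd]
      simp only [List.length_cons]
      exact le_trans (ih _) (Nat.le_succ _)

theorem pvInnerL_len_lt (op : String) (cols : List (List Char)) (r : Int) (h : cols ≠ []) :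
    ((pvInnerL op cols r).2).length < cols.length := by
  rcases cols with _ | ⟨d, rest⟩
  · exact absurd rfl h
  · simp only [pvInnerL]
    by_cases hd : d.isEmpty
    · rw [if_pos hd]
      simp
    · rw [if_neg hd]
      simp only [List.length_cons]
      exact Nat.lt_succ_of_le (pvInnerL_len _ _ _)

-- list-level reformulation of A's outer loop
def pvOuterL (operations : List String) (o : Nat) (cols : List (List Char)) : List Int :=
  if h : cols = [] then []
  else
    let op := (PySem.List.pyGet? operations (o : Int)).getD "*"
    let p := pvInnerL op cols (if op == "+" then 0 else 1)
    p.1 :: pvOuterL operations (o + 1) p.2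
termination_by cols.length
decreasing_by
  exact pvInnerL_len_lt _ cols _ h

-- the groups of ints A's grouping produces, defined structurally
def pvGrp : List (List Char) → List (List Int)
  | [] => []
  | d :: rest =>
    if d.isEmpty then [] :: pvGrp rest
    else
      match pvGrp rest with
      | [] => [[(PySem.Int.ofChars? d).getD 0]]
      | g :: gs => ((PySem.Int.ofChars? d).getD 0 :: g) :: gs

theorem pvGrp_ne_nil (cols : List (List Char)) (h : cols ≠ []) : pvGrp cols ≠ [] := by
  rcases cols with _ | ⟨d, rest⟩
  · exact absurd rfl h
  · by_cases hd : d.isEmpty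
    · simp [pvGrp, hd]
    · simp only [pvGrp, hd]
      rcases hg : pvGrp rest with _ | ⟨g, gs⟩ <;> simp

-- evaluation of the groups with operations starting at index o
def pvEval (operations : List String) (o : Nat) : List (List Int) → List Int
  | [] => []
  | g :: gs =>
    (if (PySem.List.pyGet? operations (o : Int)).getD "*" == "+" then g.foldl (· + ·) 0
     else g.foldl (· * ·) 1) :: pvEval operations (o + 1) gs

-- inner loop ↔ first group of pvGrp
theorem pvInnerL_grp (op : String) : ∀ cols r, cols ≠ [] →
    ∃ g gs, pvGrp cols = g :: gs ∧
      (pvInnerL op cols r).1 =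
        g.foldl (fun a f => if op == "+" then a + f else a * f) r ∧
      pvGrp (pvInnerL op cols r).2 = gs := by
  intro cols
  induction cols with
  | nil => intro r h; exact absurd rfl h
  | cons d rest ih =>
    intro r _
    by_cases hd : d.isEmpty
    · refine ⟨[], pvGrp rest, ?_, ?_, ?_⟩ <;> simp [pvGrp, pvInnerL, hd]
    · have hd' : d.isEmpty = false := by simpa using hd
      rcases Decidable.em (rest = []) with hrest | hrest
      · subst hrest
        refine ⟨[(PySem.Int.ofChars? d).getD 0], [], ?_, ?_, ?_⟩ <;>
          simp [pvGrp, pvInnerL, hd']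
      · obtain ⟨g, gs, hg, h1, h2⟩ := ih
          (if op == "+" then r + (PySem.Int.ofChars? d).getD 0
           else r * (PySem.Int.ofChars? d).getD 0) hrest
        refine ⟨(PySem.Int.ofChars? d).getD 0 :: g, gs, ?_, ?_, ?_⟩
        · simp [pvGrp, hd', hg]
        · simp only [pvInnerL, hd', Bool.false_eq_true, if_false, List.foldl_cons]
          exact h1
        · simp only [pvInnerL, hd', Bool.false_eq_true, if_false]
          exact h2

-- outer loop ↔ evaluating the groups
theorem pvOuterL_eval (operations : List String) :
    ∀ n cols o, cols.length ≤ n →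
      pvOuterL operations o cols = pvEval operations o (pvGrp cols) := by
  intro n
  induction n with
  | zero =>
    intro cols o h
    have : cols = [] := List.eq_nil_of_length_eq_zero (by omega)
    subst this
    simp [pvOuterL, pvGrp, pvEval]
  | succ n ih =>
    intro cols o h
    rcases Decidable.em (cols = []) with hc | hc
    · subst hc; simp [pvOuterL, pvGrp, pvEval]
    · obtain ⟨g, gs, hg, h1, h2⟩ :=
        pvInnerL_grp ((PySem.List.pyGet? operations (o : Int)).getD "*") cols
          (if (PySem.List.pyGet? operations (o : Int)).getD "*" == "+" then 0 else 1) hc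
      rw [pvOuterL]
      simp only [hc, dite_false]
      rw [hg, pvEval]
      have hlen : ((pvInnerL ((PySem.List.pyGet? operations (o : Int)).getD "*") cols
          (if (PySem.List.pyGet? operations (o : Int)).getD "*" == "+" then 0 else 1)).2).length ≤ n := by
        have := pvInnerL_len_lt ((PySem.List.pyGet? operations (o : Int)).getD "*") cols
          (if (PySem.List.pyGet? operations (o : Int)).getD "*" == "+" then 0 else 1) hc
        omega
      rw [ih _ (o + 1) hlen, h2]
      congr 1
      rw [h1]
      by_cases hop : (operations[o]?).getD "*" = "+"
      · simp [hop]
      · simp [hop]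

theorem pv_drop_width (lines : List String) :
    ((List.range (pvWidth lines)).map (pvCol lines)).drop (pvWidth lines) = [] := by
  simp [List.drop_eq_nil_iff]

-- index-level inner loop ↔ list-level inner loop on the column suffix
theorem pvInnerA_eq (lines : List String) (op : String) :
    ∀ fuel c r, pvWidth lines - c ≤ fuel → c ≤ pvWidth lines →
      (pvInnerAGo lines (pvWidth lines) op fuel c r).1 =
        (pvInnerL op (((List.range (pvWidth lines)).map (pvCol lines)).drop c) r).1 ∧
      (pvInnerAGo lines (pvWidth lines) op fuel c r).2 ≤ pvWidth lines ∧
      ((List.range (pvWidth lines)).map (pvCol lines)).drop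
          (pvInnerAGo lines (pvWidth lines) op fuel c r).2 =
        (pvInnerL op (((List.range (pvWidth lines)).map (pvCol lines)).drop c) r).2 := by
  intro fuel
  induction fuel with
  | zero =>
    intro c r h hle
    have hc : c = pvWidth lines := by omega
    subst hc
    rw [pvInnerAGo, pv_drop_width]
    simp [pvInnerL]
  | succ fuel ih =>
    intro c r h hle
    rcases Decidable.em (c < pvWidth lines) with hc | hc
    · have hdrop : ((List.range (pvWidth lines)).map (pvCol lines)).drop c =
          pvCol lines c :: ((List.range (pvWidth lines)).map (pvCol lines)).drop (c + 1) := by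
        rw [List.drop_eq_getElem_cons (by simpa using hc)]
        simp
      rw [pvInnerAGo, if_pos hc]
      by_cases hd : (pvCol lines c).isEmpty
      · rw [hdrop]
        simp [pvInnerL, hd]
        omega
      · have hd' : (pvCol lines c).isEmpty = false := by simpa using hd
        rw [hdrop]
        simp only [pvInnerL, hd', Bool.false_eq_true, if_false]
        exact ih (c + 1)
          (if op == "+" then r + (PySem.Int.ofChars? (pvCol lines c)).getD 0
           else r * (PySem.Int.ofChars? (pvCol lines c)).getD 0) (by omega) (by omega)
    · have hc' : c = pvWidth lines := by omega
      subst hc'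
      rw [pvInnerAGo, if_neg hc, pv_drop_width]
      simp [pvInnerL]

-- index-level outer loop ↔ list-level outer loop on the column suffix
theorem pvOuterA_eq (lines operations : List String) :
    ∀ fuel c o results, pvWidth lines - c ≤ fuel → c ≤ pvWidth lines →
      pvOuterAGo lines operations (pvWidth lines) fuel o c results =
        results ++ pvOuterL operations o (((List.range (pvWidth lines)).map (pvCol lines)).drop c) := by
  intro fuel
  induction fuel with
  | zero =>
    intro c o results h hle
    have hc : c = pvWidth lines := by omega
    subst hc
    rw [pvOuterAGo, pv_drop_width, pvOuterL]
    simp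
  | succ fuel ih =>
    intro c o results h hle
    rcases Decidable.em (c < pvWidth lines) with hc | hc
    · have hdrop : ((List.range (pvWidth lines)).map (pvCol lines)).drop c ≠ [] := by
        intro hnil
        have := congrArg List.length hnil
        simp at this
        omega
      rw [pvOuterAGo, if_pos hc]
      simp only [pvInnerA]
      set op := (PySem.List.pyGet? operations (o : Int)).getD "*" with hop
      obtain ⟨h1, h2, h3⟩ := pvInnerA_eq lines op (pvWidth lines - c) c (if op == "+" then 0 else 1)
        le_rfl (by omega)
      have hlt : c < (pvInnerAGo lines (pvWidth lines) op (pvWidth lines - c) c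
          (if op == "+" then 0 else 1)).2 :=
        pvInnerAGo_lt lines (pvWidth lines) op (pvWidth lines - c) c
          (if op == "+" then 0 else 1) hc le_rfl
      rw [ih ((pvInnerAGo lines (pvWidth lines) op (pvWidth lines - c) c
          (if op == "+" then 0 else 1)).2) (o + 1)
        (results ++ [(pvInnerAGo lines (pvWidth lines) op (pvWidth lines - c) c
          (if op == "+" then 0 else 1)).1])
        (by omega) h2]
      conv_rhs => rw [pvOuterL]
      rw [dif_neg hdrop, ← hop, h1, h3]
      simp
    · have hc' : c = pvWidth lines := by omega
      subst hc'
      rw [pvOuterAGo, if_neg hc, pv_drop_width, pvOuterL]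
      simp

-- B's fold-with-trailing-append ↔ the structural grouping pvGrp
def pvAttach (cur : List Int) : List (List Int) → List (List Int)
  | [] => []
  | g :: gs => (cur ++ g) :: gs

theorem pvBgroups_eq (cols : List (List Char)) :
    ∀ gs cur,
      (if (cols.getLast?.elim false (fun d => !d.isEmpty)) then
        (cols.foldl (fun (st : List (List Int) × List Int) d =>
          if d.isEmpty then (st.1 ++ [st.2], [])
          else (st.1, st.2 ++ [(PySem.Int.ofChars? d).getD 0])) (gs, cur)).1 ++
        [(cols.foldl (fun (st : List (List Int) × List Int) d =>
          if d.isEmpty then (st.1 ++ [st.2], [])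
          else (st.1, st.2 ++ [(PySem.Int.ofChars? d).getD 0])) (gs, cur)).2]
       else
        (cols.foldl (fun (st : List (List Int) × List Int) d =>
          if d.isEmpty then (st.1 ++ [st.2], [])
          else (st.1, st.2 ++ [(PySem.Int.ofChars? d).getD 0])) (gs, cur)).1) =
      gs ++ pvAttach cur (pvGrp cols) := by
  induction cols with
  | nil => intro gs cur; simp [pvGrp, pvAttach]
  | cons d rest ih =>
    intro gs cur
    by_cases hd : d.isEmpty
    · have he : d = [] := by simpa using hd
      subst he
      rcases Decidable.em (rest = []) with hrest | hrest
      · subst hrest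
        simp [pvGrp, pvAttach]
      · have hlast : (([] : List Char) :: rest).getLast? = rest.getLast? := by
          rcases rest with _ | ⟨e, es⟩
          · exact absurd rfl hrest
          · simp [List.getLast?_cons_cons]
        simp only [List.foldl_cons, hlast, List.isEmpty_nil, if_true]
        rw [ih (gs ++ [cur]) []]
        obtain ⟨g, gs', hg⟩ : ∃ g gs', pvGrp rest = g :: gs' := by
          rcases hgr : pvGrp rest with _ | ⟨g, gs'⟩
          · exact absurd hgr (pvGrp_ne_nil rest hrest)
          · exact ⟨g, gs', rfl⟩
        simp [pvGrp, hg, pvAttach]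
    · have hd' : d.isEmpty = false := by simpa using hd
      have he : d ≠ [] := by
        intro hnil
        subst hnil
        simp at hd'
      rcases Decidable.em (rest = []) with hrest | hrest
      · subst hrest
        simp [pvGrp, pvAttach, hd', he]
      · have hlast : (d :: rest).getLast? = rest.getLast? := by
          rcases rest with _ | ⟨e, es⟩
          · exact absurd rfl hrest
          · simp [List.getLast?_cons_cons]
        simp only [List.foldl_cons, hlast, hd', Bool.false_eq_true, if_false]
        rw [ih gs (cur ++ [(PySem.Int.ofChars? d).getD 0])]
        obtain ⟨g, gs', hg⟩ : ∃ g gs', pvGrp rest = g :: gs' := by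
          rcases hgr : pvGrp rest with _ | ⟨g, gs'⟩
          · exact absurd hgr (pvGrp_ne_nil rest hrest)
          · exact ⟨g, gs', rfl⟩
        simp [pvGrp, hd', hg, pvAttach]

-- B's enumerate-map ↔ pvEval
theorem pvEnum_eval (operations : List String) :
    ∀ (groups : List (List Int)) (o : Nat),
      (PySem.List.enumerate groups (o : Int)).map (fun p =>
        if (PySem.List.pyGet? operations p.1).getD "*" == "+" then p.2.foldl (· + ·) 0
        else p.2.foldl (· * ·) 1) = pvEval operations o groups := by
  intro groups
  induction groups with
  | nil => intro o; simp [pvEval, PySem.List.enumerate_nil]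
  | cons g gs ih =>
    intro o
    rw [PySem.List.enumerate_cons, List.map_cons, pvEval]
    congr 1
    have : (o : Int) + 1 = ((o + 1 : Nat) : Int) := by push_cast; ring
    rw [this, ih (o + 1)]

theorem pvAttach_nil_grp (l : List (List Int)) : pvAttach [] l = l := by
  rcases l with _ | ⟨g, gs⟩ <;> simp [pvAttach]

-- ===== VERDICT (by name: the statement is the Claim_ definition above) =====
theorem calcluate_digit_operations_spec : Claim_equal_calcluate_digit_operations := by
  intro lines operations _ _
  unfold Spec_calcluate_digit_operations
  unfold calcluate_digit_operations calcluate_digit_operations_alt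
  rw [pvOuterA_eq lines operations (pvWidth lines) 0 0 [] (by omega) (by omega)]
  simp only [List.drop_zero, List.nil_append]
  rw [pvOuterL_eval operations (((List.range (pvWidth lines)).map (pvCol lines)).length) _ 0 le_rfl]
  have hb := pvBgroups_eq ((List.range (pvWidth lines)).map (pvCol lines)) [] []
  simp only [List.nil_append, pvAttach_nil_grp] at hb
  rw [hb]
  exact (pvEnum_eval operations _ 0).symm
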